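-- pv_equiv track=rewrite | github.com/Shoeboxam/VeruSynth | src/verusynth/rust_io.py | _char_to_line
-- ===== SOURCE A (Python) =====
-- from typing import List, Tuple, Optional
--
-- def _char_to_line(offsets: List[int], lines: List[str], idx: int) -> int:
--     """Map a character index in the full text to a line index (0-based)."""
--     lo, hi = 0, len(offsets) - 1
--     while lo <= hi:
--         mid = (lo + hi) // 2
--         start = offsets[mid]
--         end = start + len(lines[mid])
--         if start <= idx < end:
--             return mid
--         if idx < start:
--             hi = mid - 1
--         else:
--             lo = mid + 1
--     return max(0, min(len(lines) - 1, lo))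
-- ===== SOURCE B (Python) =====
-- def _char_to_line(offsets, lines, idx):
--     """Map a character index in the full text to a line index (0-based)."""
--     def go(seg, base):
--         # seg is the still-candidate window of offsets; base is its global start index
--         if not seg:
--             return max(0, min(len(lines) - 1, base))
--         m = (len(seg) - 1) // 2
--         start = seg[m]
--         end = start + len(lines[base + m])
--         if start <= idx < end:
--             return base + m
--         if idx < start:
--             return go(seg[:m], base)
--         return go(seg[m + 1:], base + m + 1)
--     return go(offsets, 0)
-- ===== Notes on version B (the rewrite author's own statement) =====
-- stated objective: alternative
-- what changed: The same binary search is re-expressed as structural recursion on a shrinking slice of offsets carried with its base index, instead of A's while-loop over a (lo, hi) index pair.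
-- outside the precondition, e.g. on _char_to_line([0, 2], ['ab'], 5): A raises IndexError, B raises IndexError; on _char_to_line([3, 7], ['ab'], 0): A returns 0, B returns 0
import Mathlib
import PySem

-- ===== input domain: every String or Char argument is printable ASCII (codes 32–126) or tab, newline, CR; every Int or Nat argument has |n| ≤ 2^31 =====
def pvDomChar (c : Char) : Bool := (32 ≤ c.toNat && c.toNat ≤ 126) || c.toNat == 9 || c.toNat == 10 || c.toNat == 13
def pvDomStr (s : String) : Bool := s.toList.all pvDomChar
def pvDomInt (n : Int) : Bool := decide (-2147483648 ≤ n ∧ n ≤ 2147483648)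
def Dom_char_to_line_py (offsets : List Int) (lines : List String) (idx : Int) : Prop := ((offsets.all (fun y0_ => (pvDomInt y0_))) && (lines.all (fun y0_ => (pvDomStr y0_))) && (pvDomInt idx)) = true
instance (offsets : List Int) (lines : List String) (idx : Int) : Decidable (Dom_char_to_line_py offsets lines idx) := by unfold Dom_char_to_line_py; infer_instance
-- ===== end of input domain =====

-- B re-expresses A's index-pair while-loop as structural recursion on a shrinking slice of `offsets`
-- (same binary search, different decomposition; same cost). Header: objective 'alternative', not faster.

-- ===== PORT A =====
-- the midpoint of a closed interval lies inside it (used by the loop's termination measure)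
theorem pvMidBounds (lo hi : Int) (h : lo ≤ hi) :
    lo ≤ PySem.Int.floordiv (lo + hi) 2 ∧ PySem.Int.floordiv (lo + hi) 2 ≤ hi :=
  PySem.Int.floordiv_two_mid_bounds h

-- the `while lo <= hi` loop of A, step for step (list reads via pyGetD: in range under Pre_)
def charToLineLoopA (offsets : List Int) (lines : List String) (idx lo hi : Int) : Int :=
  if h : lo ≤ hi then
    let mid := PySem.Int.floordiv (lo + hi) 2          -- mid = (lo + hi) // 2
    let start := PySem.List.pyGetD offsets mid 0       -- start = offsets[mid]
    let stop := start + PySem.Str.len (PySem.List.pyGetD lines mid "")  -- end = start + len(lines[mid])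
    if start ≤ idx ∧ idx < stop then mid               -- if start <= idx < end: return mid
    else if idx < start then charToLineLoopA offsets lines idx lo (mid - 1)   -- hi = mid - 1
    else charToLineLoopA offsets lines idx (mid + 1) hi                        -- lo = mid + 1
  else max 0 (min ((lines.length : Int) - 1) lo)       -- return max(0, min(len(lines) - 1, lo))
termination_by (hi + 1 - lo).toNat
decreasing_by
  · have := pvMidBounds lo hi h; omega
  · have := pvMidBounds lo hi h; omega

def char_to_line_py (offsets : List Int) (lines : List String) (idx : Int) : Int :=
  charToLineLoopA offsets lines idx 0 ((offsets.length : Int) - 1)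

-- ===== PORT B =====
-- Source B's inner `go(seg, base)`: structural recursion on the slice `seg` of offsets
def charToLineGoB (lines : List String) (idx : Int) (seg : List Int) (base : Int) : Int :=
  if hseg : seg.isEmpty then max 0 (min ((lines.length : Int) - 1) base)  -- if not seg: ...
  else
    let m : Nat := (seg.length - 1) / 2                -- m = (len(seg) - 1) // 2  (len ≥ 1, so Nat division is exact here)
    let start := PySem.List.pyGetD seg (m : Int) 0     -- start = seg[m]
    let stop := start + PySem.Str.len (PySem.List.pyGetD lines (base + (m : Int)) "")  -- end = start + len(lines[base + m])
    if start ≤ idx ∧ idx < stop then base + (m : Int)  -- return base + m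
    else if idx < start then charToLineGoB lines idx (seg.take m) base     -- go(seg[:m], base)  (m ≥ 0: take is exact)
    else charToLineGoB lines idx (seg.drop (m + 1)) (base + (m : Int) + 1) -- go(seg[m+1:], base + m + 1)
termination_by seg.length
decreasing_by
  · have h1 : 0 < seg.length := by
      cases seg with
      | nil => simp at hseg
      | cons a t => simp
    simp [List.length_take]; omega
  · have h1 : 0 < seg.length := by
      cases seg with
      | nil => simp at hseg
      | cons a t => simp
    simp [List.length_drop]; omega

def char_to_line_py_alt (offsets : List Int) (lines : List String) (idx : Int) : Int :=
  charToLineGoB lines idx offsets 0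

-- ===== PRECONDITION & SPEC =====
-- Pre_ excludes inputs with fewer lines than offsets: there A can evaluate lines[mid] out of range and
-- raise IndexError depending on the search path (B raises at the identical point); the length bound is
-- the simple closed-form guarantee, so it also excludes some path-lucky inputs on which A still returns.
def Pre_char_to_line_py (offsets : List Int) (lines : List String) (idx : Int) : Prop :=
  offsets.length ≤ lines.length
instance (offsets : List Int) (lines : List String) (idx : Int) : Decidable (Pre_char_to_line_py offsets lines idx) := by unfold Pre_char_to_line_py; infer_instance

def pvWitness_char_to_line_py : List Int × List String × Int := ([0, 3, 9], ["ab", "cdefg", "h"], 4)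

def Spec_char_to_line_py (offsets : List Int) (lines : List String) (idx : Int) (out : Int) : Prop := out = char_to_line_py_alt offsets lines idx
instance (offsets : List Int) (lines : List String) (idx : Int) (out : Int) : Decidable (Spec_char_to_line_py offsets lines idx out) := by unfold Spec_char_to_line_py; infer_instance

-- ===== CLAIM (what is proved, stated in full; the proofs are below) =====
def Claim_equal_char_to_line_py : Prop := ∀ (offsets : List Int) (lines : List String) (idx : Int), Dom_char_to_line_py offsets lines idx → Pre_char_to_line_py offsets lines idx → Spec_char_to_line_py offsets lines idx (char_to_line_py offsets lines idx)

-- ===== LEMMAS AND PROOFS =====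

-- Loop/recursion correspondence: A's loop on the index pair (lo, hi) computes exactly B's recursion on
-- the slice offsets[lo : hi+1] carried with base lo.  (Holds for all inputs; Pre_ is only about Python raising.)
theorem pvLoopEqGo (offsets : List Int) (lines : List String) (idx : Int) :
    ∀ (n : Nat) (lo hi : Int), (hi + 1 - lo).toNat = n → 0 ≤ lo → hi < (offsets.length : Int) →
      charToLineLoopA offsets lines idx lo hi
        = charToLineGoB lines idx ((offsets.drop lo.toNat).take (hi + 1 - lo).toNat) lo := by
  intro n
  induction n using Nat.strong_induction_on with
  | _ n ih =>
    intro lo hi hn hlo hhi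
    by_cases hle : lo ≤ hi
    · have hLpos : 0 < (hi + 1 - lo).toNat := by omega
      have hseglen : ((offsets.drop lo.toNat).take (hi + 1 - lo).toNat).length = (hi + 1 - lo).toNat := by
        simp [List.length_take, List.length_drop]; omega
      have hne : ¬ ((offsets.drop lo.toNat).take (hi + 1 - lo).toNat).isEmpty = true := by
        rw [List.isEmpty_iff_length_eq_zero, hseglen]; omega
      have hfd := PySem.Int.floordiv_mul_add_mod (lo + hi) 2
      have hmod : PySem.Int.mod (lo + hi) 2 = (lo + hi) % 2 :=
        PySem.Int.mod_eq_emod_of_pos (by norm_num)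
      rw [hmod] at hfd
      have hmidm : PySem.Int.floordiv (lo + hi) 2
          = lo + ((((hi + 1 - lo).toNat - 1) / 2 : Nat) : Int) := by omega
      rw [charToLineLoopA, charToLineGoB, dif_pos hle, dif_neg hne]
      simp only [hseglen, hmidm]
      have hget : PySem.List.pyGetD (List.take (hi + 1 - lo).toNat (List.drop lo.toNat offsets))
            (((((hi + 1 - lo).toNat - 1) / 2 : Nat) : Int)) 0
          = PySem.List.pyGetD offsets (lo + ((((hi + 1 - lo).toNat - 1) / 2 : Nat) : Int)) 0 := by
        rw [PySem.List.pyGetD_natCast,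
            PySem.List.pyGetD_eq_getElem offsets 0 (by omega) (by omega),
            List.getD_eq_getElem _ _ (by rw [hseglen]; omega),
            List.getElem_take, List.getElem_drop]
        have hix : lo.toNat + ((hi + 1 - lo).toNat - 1) / 2 = (lo + ((((hi + 1 - lo).toNat - 1) / 2 : Nat) : Int)).toNat := by omega
        simp only [hix]
      rw [hget]
      split_ifs with h1 h2
      · rfl
      · have hrec := ih ((((hi + 1 - lo).toNat - 1) / 2)) (by omega) lo
          (lo + ((((hi + 1 - lo).toNat - 1) / 2 : Nat) : Int) - 1) (by omega) hlo (by omega)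
        rw [hrec]
        have hseg2 : List.take ((lo + ((((hi + 1 - lo).toNat - 1) / 2 : Nat) : Int) - 1) + 1 - lo).toNat
              (List.drop lo.toNat offsets)
            = List.take (((hi + 1 - lo).toNat - 1) / 2)
              (List.take (hi + 1 - lo).toNat (List.drop lo.toNat offsets)) := by
          rw [List.take_take]
          congr 1
          omega
        rw [hseg2]
      · have hrec := ih ((hi + 1 - lo).toNat - ((((hi + 1 - lo).toNat - 1) / 2) + 1)) (by omega)
          (lo + ((((hi + 1 - lo).toNat - 1) / 2 : Nat) : Int) + 1) hi (by omega) (by omega) hhi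
        rw [hrec]
        have hseg3 : List.take (hi + 1 - (lo + ((((hi + 1 - lo).toNat - 1) / 2 : Nat) : Int) + 1)).toNat
              (List.drop (lo + ((((hi + 1 - lo).toNat - 1) / 2 : Nat) : Int) + 1).toNat offsets)
            = List.drop ((((hi + 1 - lo).toNat - 1) / 2) + 1)
              (List.take (hi + 1 - lo).toNat (List.drop lo.toNat offsets)) := by
          rw [List.drop_take, List.drop_drop]
          congr 1
          · omega
          · congr 1
            omega
        rw [hseg3]
    · rw [charToLineLoopA, charToLineGoB, dif_neg hle]
      have h0 : (hi + 1 - lo).toNat = 0 := by omega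
      rw [h0]
      simp

theorem char_to_line_py_spec : Claim_equal_char_to_line_py := by
  intro offsets lines idx _hd _hp
  unfold Spec_char_to_line_py char_to_line_py char_to_line_py_alt
  have h := pvLoopEqGo offsets lines idx (((offsets.length : Int) - 1) + 1 - 0).toNat 0 ((offsets.length : Int) - 1) rfl (by omega) (by omega)
  simpa using h
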